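-- pv_equiv track=rewrite | github.com/oskari6/Studies | Python/Mooc/Algo I/w2t4_fastrounds.py | count_rounds
-- ===== SOURCE A (Python) =====
-- def count_rounds(numbers):
--     temp = set()
--     count = 0
--     maximum = max(numbers)
--     for i,num in enumerate(numbers):
--         if num == maximum: count += 1
--         elif num+1 in temp: count += 1
--         temp.add(num)
--     return count
-- ===== SOURCE B (Python) =====
-- def count_rounds(numbers):
--     maximum = max(numbers)
--     positions = {}
--     for i, num in enumerate(numbers):
--         positions.setdefault(num, []).append(i)
--     count = 0
--     for v, idx in positions.items():
--         if v == maximum: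
--             count += len(idx)
--         elif v + 1 in positions:
--             f = positions[v + 1][0]
--             count += sum(1 for i in idx if i > f)
--     return count
-- ===== Notes on version B (the rewrite author's own statement) =====
-- stated objective: alternative
-- what changed: A's per-element online loop with a growing seen-set is replaced by a group-by-value aggregation: one pass builds a value -> list-of-positions multimap, then a loop over the DISTINCT values adds each group's contribution (all occurrences for the maximum; otherwise the count of occurrences after the first position of value+1).
-- outside the precondition, e.g. on count_rounds([]): A raises ValueError, B raises ValueError
import Mathlib
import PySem

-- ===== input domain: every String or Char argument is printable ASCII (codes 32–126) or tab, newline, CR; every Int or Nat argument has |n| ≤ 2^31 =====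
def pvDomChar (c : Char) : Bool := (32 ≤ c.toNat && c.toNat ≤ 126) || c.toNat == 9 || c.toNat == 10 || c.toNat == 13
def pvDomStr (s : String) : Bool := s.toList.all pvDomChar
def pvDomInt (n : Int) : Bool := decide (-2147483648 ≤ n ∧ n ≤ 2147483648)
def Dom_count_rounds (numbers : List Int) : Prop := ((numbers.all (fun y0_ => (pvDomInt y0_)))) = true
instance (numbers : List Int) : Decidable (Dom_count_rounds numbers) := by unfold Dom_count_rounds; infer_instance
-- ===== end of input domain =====

-- B replaces A's per-element loop with a growing seen-set by a group-by-value aggregation over a positions multimap (alternative decomposition, same cost).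

-- ===== PORT A =====
def count_rounds (numbers : List Int) : Int :=
  match PySem.List.max? numbers (fun x => x) with
  | none => 0            -- unreachable under Pre_: Python raises ValueError on max([])
  | some maximum =>
    ((PySem.List.enumerate numbers).foldl
      (fun (st : PySem.Set Int × Int) p =>
        (PySem.Set.add st.1 p.2,
         if p.2 = maximum then st.2 + 1
         else if PySem.Set.contains st.1 (p.2 + 1) then st.2 + 1 else st.2))
      (PySem.Set.empty, 0)).2

-- ===== PORT B =====
def count_rounds_alt (numbers : List Int) : Int :=
  match PySem.List.max? numbers (fun x => x) with
  | none => 0            -- unreachable under Pre_: Python raises ValueError on max([])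
  | some maximum =>
    -- positions.setdefault(num, []).append(i)  ==  positions[num] = positions.get(num, []) + [i]
    let positions : PySem.Dict Int (List Int) :=
      (PySem.List.enumerate numbers).foldl
        (fun d p => d.modify p.2 [] (fun l => l ++ [p.1])) PySem.Dict.empty
    positions.items.foldl
      (fun (count : Int) q =>
        if q.1 = maximum then count + PySem.List.len q.2
        else if positions.contains (q.1 + 1) then
          -- positions[v+1][0]: the list is nonempty whenever the key is present, so the default is unreachable
          let f := (PySem.List.pyGet? (positions.getD (q.1 + 1) []) 0).getD 0
          count + q.2.foldl (fun s i => if f < i then s + 1 else s) 0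
        else count) 0

-- ===== PRECONDITION & SPEC =====
-- Pre_ excludes only the empty list, on which Python's max([]) raises ValueError (in A and in B alike).
def Pre_count_rounds (numbers : List Int) : Prop := numbers ≠ []
instance (numbers : List Int) : Decidable (Pre_count_rounds numbers) := by unfold Pre_count_rounds; infer_instance
def pvWitness_count_rounds : List Int := [1, 2]

def Spec_count_rounds (numbers : List Int) (out : Int) : Prop := out = count_rounds_alt numbers
instance (numbers : List Int) (out : Int) : Decidable (Spec_count_rounds numbers out) := by unfold Spec_count_rounds; infer_instance

-- ===== CLAIM (what is proved, stated in full; the proofs are below) =====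
def Claim_equal_count_rounds : Prop := ∀ (numbers : List Int), Dom_count_rounds numbers → Pre_count_rounds numbers → Spec_count_rounds numbers (count_rounds numbers)

-- ===== LEMMAS AND PROOFS =====

-- first index (counting from s) of v in xs
def firstIdx (xs : List Int) (v : Int) (s : Int) : Option Int :=
  match xs with
  | [] => none
  | x :: t => if x = v then some s else firstIdx t v (s + 1)

-- the per-position condition both programs count: value is the maximum, or value+1 occurs strictly earlier
def condA (numbers : List Int) (m : Int) (p : Int × Int) : Bool :=
  (p.2 == m) || (match firstIdx numbers (p.2 + 1) 0 with
                 | some f => decide (f < p.1)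
                 | none => false)

-- the position list B's dict records for value v
def idxL (numbers : List Int) (v : Int) : List Int :=
  ((PySem.List.enumerate numbers).filter (fun p => p.2 == v)).map (·.1)

theorem firstIdx_eq_none (xs : List Int) (v s : Int) :
    firstIdx xs v s = none ↔ v ∉ xs := by
  induction xs generalizing s with
  | nil => simp [firstIdx]
  | cons x t ih =>
    by_cases h : x = v
    · subst h; simp [firstIdx]
    · simp only [firstIdx, if_neg h, ih, List.mem_cons]
      constructor
      · intro hnt hmem
        rcases hmem with rfl | hmem
        · exact h rfl
        · exact hnt hmem
      · intro hn ht; exact hn (Or.inr ht)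

theorem firstIdx_bounds (xs : List Int) (v s j : Int) (h : firstIdx xs v s = some j) :
    s ≤ j ∧ j < s + xs.length := by
  induction xs generalizing s with
  | nil => simp [firstIdx] at h
  | cons x t ih =>
    simp only [firstIdx] at h
    split at h
    · cases h; simp
    · have := ih (s + 1) h
      simp only [List.length_cons]
      push_cast
      omega

theorem firstIdx_append (xs ys : List Int) (v s : Int) :
    firstIdx (xs ++ ys) v s = (firstIdx xs v s).or (firstIdx ys v (s + xs.length)) := by
  induction xs generalizing s with
  | nil => simp [firstIdx]
  | cons x t ih =>
    by_cases h : x = v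
    · simp [firstIdx, h]
    · simp only [List.cons_append, firstIdx, if_neg h, ih, List.length_cons]
      congr 2
      push_cast
      ring

-- "first index of v is strictly before |pre|" means exactly "v occurs in pre"
theorem firstIdx_lt_iff (pre suf : List Int) (v : Int) :
    (match firstIdx (pre ++ suf) v 0 with
     | some f => f < (pre.length : Int)
     | none => False) ↔ v ∈ pre := by
  rw [firstIdx_append]
  by_cases hp : v ∈ pre
  · have hne : firstIdx pre v 0 ≠ none := by
      rw [Ne, firstIdx_eq_none]; simpa using hp
    cases h : firstIdx pre v 0 with
    | none => exact absurd h hne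
    | some j =>
      have hb := firstIdx_bounds pre v 0 j h
      simp only [Option.some_or]
      constructor
      · intro _; exact hp
      · intro _; omega
  · have h0 : firstIdx pre v 0 = none := by rw [firstIdx_eq_none]; exact hp
    rw [h0, Option.none_or]
    cases h : firstIdx suf v (0 + pre.length) with
    | none => simpa using hp
    | some j =>
      have hb := firstIdx_bounds suf v (0 + pre.length) j h
      simp only []
      constructor
      · intro hlt; omega
      · intro hv; exact absurd hv hp

-- B's positions list for v starts at v's first index
theorem firstIdx_head (xs : List Int) (v : Int) :
    firstIdx xs v 0 = (idxL xs v).head? := by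
  unfold idxL
  have aux : ∀ (ys : List Int) (s : Int), firstIdx ys v s
      = (((PySem.List.enumerate ys s).filter (fun p => p.2 == v)).map (·.1)).head? := by
    intro ys
    induction ys with
    | nil => intro s; simp [firstIdx, PySem.List.enumerate_nil]
    | cons x t ih =>
      intro s
      rw [PySem.List.enumerate_cons]
      by_cases h : x = v
      · simp [firstIdx, h]
      · have hb : ((s, x).2 == v) = false := by simpa using h
        simp only [firstIdx, if_neg h, List.filter_cons, hb]
        exact ih (s + 1)
  exact aux xs 0

-- A's loop counts condA over the enumerated suffix
theorem A_loop (numbers : List Int) (m : Int) :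
    ∀ (suf pre : List Int) (temp : PySem.Set Int) (c : Int),
    pre ++ suf = numbers →
    (∀ v, PySem.Set.contains temp v = true ↔ v ∈ pre) →
    ((PySem.List.enumerate suf (pre.length : Int)).foldl
      (fun (st : PySem.Set Int × Int) p =>
        (PySem.Set.add st.1 p.2,
         if p.2 = m then st.2 + 1
         else if PySem.Set.contains st.1 (p.2 + 1) then st.2 + 1 else st.2))
      (temp, c)).2
    = c + (((PySem.List.enumerate suf (pre.length : Int)).countP (condA numbers m) : Nat) : Int) := by
  intro suf
  induction suf with
  | nil => intro pre temp c _ _; simp [PySem.List.enumerate_nil]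
  | cons x t ih =>
    intro pre temp c hsplit hT
    rw [PySem.List.enumerate_cons]
    simp only [List.foldl_cons, List.countP_cons]
    have hiff : ((match firstIdx numbers (x + 1) 0 with
        | some f => f < ((pre.length : Nat) : Int)
        | none => False)) ↔ (x + 1) ∈ pre := by
      rw [← hsplit]; exact firstIdx_lt_iff pre (x :: t) (x + 1)
    have hstep : (if x = m then c + 1
        else if PySem.Set.contains temp (x + 1) then c + 1 else c)
        = c + (if condA numbers m (((pre.length : Nat) : Int), x) then 1 else 0) := by
      by_cases hm : x = m
      · simp [condA, hm]
      · have hmb : (x == m) = false := by simpa using hm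
        rw [if_neg hm]
        by_cases hs : PySem.Set.contains temp (x + 1) = true
        · have hx : (x + 1) ∈ pre := (hT _).mp hs
          have hmem := hiff.mpr hx
          have hct : condA numbers m (((pre.length : Nat) : Int), x) = true := by
            simp only [condA, hmb, Bool.false_or]
            cases hfi : firstIdx numbers (x + 1) 0 with
            | none => rw [hfi] at hmem; exact absurd hmem (by simp)
            | some f => rw [hfi] at hmem; simpa using hmem
          rw [if_pos hs, hct]; simp
        · have hx : (x + 1) ∉ pre := fun h => hs ((hT _).mpr h)
          have hcf : condA numbers m (((pre.length : Nat) : Int), x) = false := by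
            simp only [condA, hmb, Bool.false_or]
            cases hfi : firstIdx numbers (x + 1) 0 with
            | none => rfl
            | some f =>
              rw [hfi] at hiff
              simp only [decide_eq_false_iff_not]
              intro hlt
              exact hx (hiff.mp hlt)
          rw [if_neg hs, hcf]; simp
    have hT' : ∀ v, PySem.Set.contains (PySem.Set.add temp x) v = true ↔ v ∈ pre ++ [x] := by
      intro v
      rw [PySem.Set.contains_iff, PySem.Set.mem_add, List.mem_append, List.mem_singleton]
      rw [← PySem.Set.contains_iff, hT]
    have hsplit' : (pre ++ [x]) ++ t = numbers := by rw [← hsplit]; simp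
    have hlen : ((pre.length : Nat) : Int) + 1 = (((pre ++ [x]).length : Nat) : Int) := by simp
    rw [hlen]
    rw [ih (pre ++ [x]) (PySem.Set.add temp x) _ hsplit' hT']
    rw [hstep]
    split_ifs <;> push_cast <;> ring

-- values partition the count
theorem partition_countP (P : Int × Int → Bool) :
    ∀ (vs : List Int) (l : List (Int × Int)), vs.Nodup → (∀ p ∈ l, p.2 ∈ vs) →
    (vs.map (fun v => (((l.filter (fun p => p.2 == v)).countP P : Nat) : Int))).sum
      = ((l.countP P : Nat) : Int) := by
  intro vs
  induction vs with
  | nil =>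
    intro l _ hcov
    have : l = [] := List.eq_nil_iff_forall_not_mem.mpr (fun p hp => by simpa using hcov p hp)
    simp [this]
  | cons v t ih =>
    intro l hnd hcov
    have hvt : v ∉ t := (List.nodup_cons.mp hnd).1
    have hndt : t.Nodup := (List.nodup_cons.mp hnd).2
    have hsplit := List.countP_eq_countP_filter_add l P (fun p => p.2 == v)
    have hcov' : ∀ p ∈ l.filter (fun p => !(p.2 == v)), p.2 ∈ t := by
      intro p hp
      rw [List.mem_filter] at hp
      have := hcov p hp.1
      rcases List.mem_cons.mp this with h | h
      · exact absurd (by simpa using h) (by simpa using hp.2)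
      · exact h
    have hmapeq : ∀ u ∈ t,
        ((l.filter (fun p => !(p.2 == v))).filter (fun p => p.2 == u)) = l.filter (fun p => p.2 == u) := by
      intro u hu
      rw [List.filter_filter]
      apply List.filter_congr
      intro p _
      by_cases h : p.2 = u
      · have hne : ¬ u = v := fun hv => hvt (hv ▸ hu)
        simp [h, hne]
      · simp [h]
    have ihh := ih (l.filter (fun p => !(p.2 == v))) hndt hcov'
    have hsum : (t.map (fun u => (((l.filter (fun p => p.2 == u)).countP P : Nat) : Int))).sum
        = (t.map (fun u => ((((l.filter (fun p => !(p.2 == v))).filter (fun p => p.2 == u)).countP P : Nat) : Int))).sum := by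
      apply congrArg List.sum
      apply List.map_congr_left
      intro u hu
      rw [hmapeq u hu]
    rw [List.map_cons, List.sum_cons, hsum, ihh, hsplit]
    push_cast
    ring

-- the contribution of one (value, positions) group in B's second loop
def gB (m : Int) (D : PySem.Dict Int (List Int)) (q : Int × List Int) : Int :=
  if q.1 = m then PySem.List.len q.2
  else if D.contains (q.1 + 1) then
    q.2.foldl
      (fun s i => if (PySem.List.pyGet? (D.getD (q.1 + 1) []) 0).getD 0 < i then s + 1 else s) 0
  else 0

theorem gval (numbers : List Int) (m v : Int) (D : PySem.Dict Int (List Int))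
    (hgetD : ∀ c, D.getD c [] = idxL numbers c)
    (hcont : ∀ w, D.contains w = true ↔ w ∈ numbers) :
    gB m D (v, idxL numbers v)
      = ((((PySem.List.enumerate numbers 0).filter (fun p => p.2 == v)).countP (condA numbers m) : Nat) : Int) := by
  unfold gB
  by_cases hm : v = m
  · rw [if_pos hm]
    have hall : ∀ p ∈ (PySem.List.enumerate numbers 0).filter (fun p => p.2 == v),
        condA numbers m p = true := by
      intro p hp
      have h2 : p.2 = v := by simpa using (List.mem_filter.mp hp).2
      simp [condA, h2, hm]
    rw [List.countP_eq_length.mpr hall]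
    simp [idxL, PySem.List.len]
  · rw [if_neg hm]
    have hmb : (v == m) = false := by simpa using hm
    by_cases hc : D.contains (v + 1) = true
    · rw [if_pos hc]
      have hv1 : (v + 1) ∈ numbers := (hcont _).mp hc
      obtain ⟨f0, hf0⟩ : ∃ f0, firstIdx numbers (v + 1) 0 = some f0 := by
        cases hfi : firstIdx numbers (v + 1) 0 with
        | none => exact absurd ((firstIdx_eq_none _ _ _).mp hfi) (by simpa using hv1)
        | some f => exact ⟨f, rfl⟩
      have hhead : (idxL numbers (v + 1)).head? = some f0 := by rw [← firstIdx_head]; exact hf0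
      have hf : (PySem.List.pyGet? (D.getD (v + 1) []) 0).getD 0 = f0 := by
        rw [hgetD]
        cases hl : idxL numbers (v + 1) with
        | nil => rw [hl] at hhead; simp at hhead
        | cons a rest =>
          rw [hl] at hhead
          simp only [List.head?_cons, Option.some.injEq] at hhead
          subst hhead
          simp [PySem.List.pyGet?, PySem.List.pyIdx?]
      simp only [hf]
      rw [PySem.List.foldl_ite_add_one (fun i => f0 < i) _ 0]
      unfold idxL
      rw [List.countP_map]
      have hcong : ((PySem.List.enumerate numbers 0).filter (fun p => p.2 == v)).countP
            ((fun i => decide (f0 < i)) ∘ (·.1))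
          = ((PySem.List.enumerate numbers 0).filter (fun p => p.2 == v)).countP
            (condA numbers m) := by
        apply List.countP_congr
        intro p hp
        have h2 : p.2 = v := by simpa using (List.mem_filter.mp hp).2
        simp only [condA, h2, hmb, Bool.false_or, hf0, Function.comp]
      rw [hcong]
      simp
    · rw [if_neg hc]
      have hv1 : (v + 1) ∉ numbers := fun h => hc ((hcont _).mpr h)
      have hfi : firstIdx numbers (v + 1) 0 = none := (firstIdx_eq_none _ _ _).mpr hv1
      have hz : ((PySem.List.enumerate numbers 0).filter (fun p => p.2 == v)).countP
          (condA numbers m) = 0 := by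
        rw [List.countP_eq_zero]
        intro p hp
        have h2 : p.2 = v := by simpa using (List.mem_filter.mp hp).2
        simp [condA, h2, hmb, hfi]
      rw [hz]
      simp

-- B's whole some-branch computes the same count of condA over the enumeration
theorem B_eq (numbers : List Int) (m : Int) :
    ((PySem.List.enumerate numbers 0).foldl
        (fun d p => d.modify p.2 [] (fun l => l ++ [p.1])) PySem.Dict.empty).items.foldl
      (fun (count : Int) q =>
        if q.1 = m then count + PySem.List.len q.2
        else if ((PySem.List.enumerate numbers 0).foldl
            (fun d p => d.modify p.2 [] (fun l => l ++ [p.1])) PySem.Dict.empty).contains (q.1 + 1) then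
          count + q.2.foldl
            (fun s i => if (PySem.List.pyGet? (((PySem.List.enumerate numbers 0).foldl
                (fun d p => d.modify p.2 [] (fun l => l ++ [p.1])) PySem.Dict.empty).getD (q.1 + 1) []) 0).getD 0 < i
              then s + 1 else s) 0
        else count) 0
    = (((PySem.List.enumerate numbers 0).countP (condA numbers m) : Nat) : Int) := by
  set D : PySem.Dict Int (List Int) :=
    (PySem.List.enumerate numbers 0).foldl
      (fun d p => d.modify p.2 [] (fun l => l ++ [p.1])) PySem.Dict.empty with hD
  have hkeys : D.keys = PySem.Set.ofList numbers := by
    rw [hD, PySem.Dict.keys_foldl_modify_key (PySem.List.enumerate numbers 0) (fun p => p.2) []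
        (fun _ p l => l ++ [p.1]) PySem.Dict.empty]
    rw [PySem.Dict.keys_empty, PySem.List.map_snd_enumerate]
    rfl
  have hnodup : D.keys.Nodup := by
    rw [hkeys]; exact PySem.Set.nodup_ofList numbers
  have hgetD : ∀ c, D.getD c [] = idxL numbers c := by
    intro c
    have hswap : D = ((PySem.List.enumerate numbers 0).map Prod.swap).foldl
        (fun d q => d.modify q.1 [] (fun l => l ++ [q.2])) PySem.Dict.empty := by
      rw [List.foldl_map]
      rfl
    rw [hswap, PySem.Dict.getD_foldl_modify_append, PySem.Dict.getD_empty]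
    rw [List.filter_map, List.map_map]
    unfold idxL
    simp [Function.comp_def, Prod.swap]
  have hcont : ∀ w, D.contains w = true ↔ w ∈ numbers := by
    intro w
    rw [PySem.Dict.contains_iff_mem_keys D w, hkeys]
    exact PySem.Set.mem_ofList numbers w
  have hitems : D.items = (PySem.Set.ofList numbers).map (fun v => (v, idxL numbers v)) := by
    rw [PySem.Dict.items_eq_map_keys D hnodup [], hkeys]
    apply List.map_congr_left
    intro v _
    rw [hgetD]
  have hpt : ∀ (acc : Int), ∀ q ∈ D.items,
      (if q.1 = m then acc + PySem.List.len q.2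
       else if D.contains (q.1 + 1) then
         acc + q.2.foldl
           (fun s i => if (PySem.List.pyGet? (D.getD (q.1 + 1) []) 0).getD 0 < i then s + 1 else s) 0
       else acc)
      = acc + gB m D q := by
    intro acc q _
    unfold gB
    split_ifs <;> simp
  rw [PySem.List.foldl_congr_mem D.items _ (fun acc q => acc + gB m D q) 0 hpt]
  rw [PySem.List.foldl_add, hitems, List.map_map]
  have hg : ∀ v ∈ PySem.Set.ofList numbers,
      (gB m D ∘ fun v => (v, idxL numbers v)) v
        = ((((PySem.List.enumerate numbers 0).filter (fun p => p.2 == v)).countP (condA numbers m) : Nat) : Int) := by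
    intro v _
    exact gval numbers m v D hgetD hcont
  rw [List.map_congr_left hg]
  rw [partition_countP (condA numbers m) (PySem.Set.ofList numbers) (PySem.List.enumerate numbers 0)
      (PySem.Set.nodup_ofList numbers) ?hcov]
  · simp
  · intro p hp
    rw [PySem.Set.mem_ofList]
    rw [← PySem.List.map_snd_enumerate numbers 0]
    exact List.mem_map_of_mem hp

-- ===== VERDICT (by name: the statement is the Claim_ definition above) =====
theorem count_rounds_spec : Claim_equal_count_rounds := by
  intro numbers _ _
  unfold Spec_count_rounds count_rounds count_rounds_alt
  cases h : PySem.List.max? numbers (fun x => x) with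
  | none => rfl
  | some m =>
    simp only
    rw [B_eq numbers m]
    have hA := A_loop numbers m numbers [] PySem.Set.empty 0 (by simp)
      (by intro v; simp [PySem.Set.empty])
    simpa using hA
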